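-- pv_equiv track=rewrite | github.com/calders/RadioMeteorZoo | utils.py | classify_detections
-- ===== SOURCE A (Python) =====
-- def is_intersection(rect_a, rect_b):
--     """Detect if 2 rectangles are intersecting"""
--     #rect_XYZ[0]=left
--     #rect_XYZ[1]=bottom
--     #rect_XYZ[2]=right
--     #rect_XYZ[3]=top
--     separate = rect_a[2] < rect_b[0] or \
--                rect_a[0] > rect_b[2] or \
--                rect_a[3] < rect_b[1] or \
--                rect_a[1] > rect_b[3]
--     return not separate
--
-- def classify_detections(border_thresholds,border_references):
--     """Compare meteor observations with the reference. (Wrapper function)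
--        Classify in true positive, false positive and false negative"""
--     true_positives = {} #both in reference and observation
--     false_positives = {} #only in observation
--     false_negatives = {} #only in reference
--     for filename, border_threshold in border_thresholds.items():
--         border_reference = border_references[filename]
--         true_positive, false_positive, false_negative = classify_detection(border_threshold,border_reference)
--         true_positives[filename] = true_positive
--         false_positives[filename] = false_positive
--         false_negatives[filename] = false_negative
--     return (true_positives, false_positives, false_negatives)
--
-- def classify_detection(border_threshold,border_reference):
--     """Compare meteor observations with the reference.
--        Classify in true positive, false positive and false negative"""
--     true_positive = []
--     false_positive = list(border_threshold)
--     false_negative = list(border_reference)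
--     bref_used = [False] * len(border_reference)
--     for rectangle in border_threshold:
--         for i in range(len(border_reference)):
--            if not bref_used[i]:
--                rectangle_ref = border_reference[i]
--                if is_intersection(rectangle_ref,rectangle):
--                     bref_used[i]=True
--                     true_positive.append(rectangle_ref)
--                     false_positive.remove(rectangle)
--                     false_negative.remove(rectangle_ref)
--                     break
--     return (true_positive, false_positive, false_negative)
-- ===== SOURCE B (Python) =====
-- def is_intersection(rect_a, rect_b):
--     """Detect if 2 rectangles are intersecting"""
--     return not (rect_a[2] < rect_b[0] or rect_a[0] > rect_b[2] or
--                 rect_a[3] < rect_b[1] or rect_a[1] > rect_b[3])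
--
-- def classify_detection(border_threshold, border_reference):
--     """Greedy matching, recording matched indices instead of removing from copies."""
--     true_positive = []
--     used_refs = set()
--     matched_thr = set()
--     for j, rectangle in enumerate(border_threshold):
--         for i, rectangle_ref in enumerate(border_reference):
--             if i not in used_refs and is_intersection(rectangle_ref, rectangle):
--                 used_refs.add(i)
--                 matched_thr.add(j)
--                 true_positive.append(rectangle_ref)
--                 break
--     false_positive = [r for j, r in enumerate(border_threshold) if j not in matched_thr]
--     false_negative = [r for i, r in enumerate(border_reference) if i not in used_refs]
--     return (true_positive, false_positive, false_negative)
--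
-- def classify_detections(border_thresholds, border_references):
--     """Compare meteor observations with the reference. (Wrapper function)"""
--     results = {f: classify_detection(bt, border_references[f])
--                for f, bt in border_thresholds.items()}
--     return ({f: r[0] for f, r in results.items()},
--             {f: r[1] for f, r in results.items()},
--             {f: r[2] for f, r in results.items()})
-- ===== Notes on version B (the rewrite author's own statement) =====
-- stated objective: simpler
-- what changed: Per file, instead of pre-filling false_positive/false_negative with full list copies and calling list.remove (a linear scan) inside the greedy loop, B records the matched threshold and reference indices in sets during the same greedy pass and builds false_positive/false_negative afterwards by filtering the unmatched entries; the wrapper builds one results dict and splits it with three comprehensions instead of filling three dicts in the loop.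
import Mathlib
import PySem

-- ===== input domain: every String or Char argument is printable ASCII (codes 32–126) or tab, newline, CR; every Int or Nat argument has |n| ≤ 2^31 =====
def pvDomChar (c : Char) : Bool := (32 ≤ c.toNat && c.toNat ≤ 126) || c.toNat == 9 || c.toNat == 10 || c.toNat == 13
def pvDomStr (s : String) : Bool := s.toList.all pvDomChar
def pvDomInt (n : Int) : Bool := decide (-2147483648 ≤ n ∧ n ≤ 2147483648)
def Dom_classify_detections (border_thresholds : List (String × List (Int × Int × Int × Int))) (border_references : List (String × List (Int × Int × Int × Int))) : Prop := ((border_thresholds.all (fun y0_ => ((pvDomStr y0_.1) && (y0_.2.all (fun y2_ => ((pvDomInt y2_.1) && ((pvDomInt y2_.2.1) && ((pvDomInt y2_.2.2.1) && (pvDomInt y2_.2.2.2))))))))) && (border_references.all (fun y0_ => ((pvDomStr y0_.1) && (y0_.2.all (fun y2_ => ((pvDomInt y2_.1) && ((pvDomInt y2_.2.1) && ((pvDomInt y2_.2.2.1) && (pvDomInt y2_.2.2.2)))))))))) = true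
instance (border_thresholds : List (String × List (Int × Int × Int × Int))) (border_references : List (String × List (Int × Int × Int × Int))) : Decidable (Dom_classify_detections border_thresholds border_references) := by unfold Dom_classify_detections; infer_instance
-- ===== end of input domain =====

-- B replaces A's remove-from-prefilled-copies bookkeeping by recording matched indices during the
-- same greedy pass and filtering afterwards (objective: simpler); return value only, no mutation.

-- ===== PORT A =====
abbrev PvRect := Int × Int × Int × Int

def is_intersection (rect_a rect_b : PvRect) : Bool :=
  !(decide (rect_a.2.2.1 < rect_b.1) || decide (rect_a.1 > rect_b.2.2.1) ||
    decide (rect_a.2.2.2 < rect_b.2.1) || decide (rect_a.2.1 > rect_b.2.2.2))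

-- list.remove(v); the ValueError branch (v absent) is unreachable in A's loop
def pvRemove (xs : List PvRect) (v : PvRect) : List PvRect :=
  match PySem.List.remove? xs v with
  | some l => l
  | none => xs

-- the inner 'for i in range(len(border_reference)): … break' loop of classify_detection
def pvInnerA (br : List PvRect) (rect : PvRect) :
    List Nat → List PvRect × List PvRect × List PvRect × List Bool →
    List PvRect × List PvRect × List PvRect × List Bool
  | [], st => st
  | i :: rest, (tp, fp, fn, used) =>
    if used.getD i false then pvInnerA br rect rest (tp, fp, fn, used)
    else
      let rr := br.getD i (0, 0, 0, 0)
      if is_intersection rr rect then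
        (tp ++ [rr], pvRemove fp rect, pvRemove fn rr, used.set i true)
      else pvInnerA br rect rest (tp, fp, fn, used)

def classify_detection (border_threshold border_reference : List PvRect) :
    List PvRect × List PvRect × List PvRect :=
  let r := border_threshold.foldl
      (fun st rect => pvInnerA border_reference rect (List.range border_reference.length) st)
      ([], border_threshold, border_reference, List.replicate border_reference.length false)
  (r.1, r.2.1, r.2.2.1)

def classify_detections (border_thresholds : List (String × List (Int × Int × Int × Int))) (border_references : List (String × List (Int × Int × Int × Int))) : (List (String × List (Int × Int × Int × Int))) × (List (String × List (Int × Int × Int × Int))) × (List (String × List (Int × Int × Int × Int))) :=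
  let r := border_thresholds.foldl
    (fun (acc : PySem.Dict String (List PvRect) × PySem.Dict String (List PvRect) × PySem.Dict String (List PvRect)) p =>
      match (PySem.Dict.mk border_references).get? p.1 with
      | some border_reference =>
        let c := classify_detection p.2 border_reference
        (acc.1.insert p.1 c.1, acc.2.1.insert p.1 c.2.1, acc.2.2.insert p.1 c.2.2)
      | none => acc)   -- KeyError: excluded by Pre_
    (PySem.Dict.mk [], PySem.Dict.mk [], PySem.Dict.mk [])
  (r.1.items, r.2.1.items, r.2.2.items)

-- ===== PORT B =====
def pvIntersects (rect_a rect_b : PvRect) : Bool :=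
  !(decide (rect_a.2.2.1 < rect_b.1) || decide (rect_a.1 > rect_b.2.2.1) ||
    decide (rect_a.2.2.2 < rect_b.2.1) || decide (rect_a.2.1 > rect_b.2.2.2))

-- the inner 'for i, rectangle_ref in enumerate(border_reference): … break' loop of B
def pvFindMatch (used : PySem.Set Int) (rect : PvRect) :
    List (Int × PvRect) → Option (Int × PvRect)
  | [] => none
  | q :: rest =>
    if !(PySem.Set.contains used q.1) && pvIntersects q.2 rect then some q
    else pvFindMatch used rect rest

def classify_detection_alt (border_threshold border_reference : List PvRect) :
    List PvRect × List PvRect × List PvRect :=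
  let st := (PySem.List.enumerate border_threshold).foldl
    (fun (st : List PvRect × PySem.Set Int × PySem.Set Int) p =>
      match pvFindMatch st.2.1 p.2 (PySem.List.enumerate border_reference) with
      | some q => (st.1 ++ [q.2], PySem.Set.add st.2.1 q.1, PySem.Set.add st.2.2 p.1)
      | none => st)
    ([], PySem.Set.empty, PySem.Set.empty)
  (st.1,
   ((PySem.List.enumerate border_threshold).filter
      (fun p => !(PySem.Set.contains st.2.2 p.1))).map (·.2),
   ((PySem.List.enumerate border_reference).filter
      (fun q => !(PySem.Set.contains st.2.1 q.1))).map (·.2))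

def classify_detections_alt (border_thresholds : List (String × List (Int × Int × Int × Int))) (border_references : List (String × List (Int × Int × Int × Int))) : (List (String × List (Int × Int × Int × Int))) × (List (String × List (Int × Int × Int × Int))) × (List (String × List (Int × Int × Int × Int))) :=
  let results := border_thresholds.foldl
    (fun (d : PySem.Dict String (List PvRect × List PvRect × List PvRect)) p =>
      match (PySem.Dict.mk border_references).get? p.1 with
      | some border_reference => d.insert p.1 (classify_detection_alt p.2 border_reference)
      | none => d)   -- KeyError: excluded by Pre_
    (PySem.Dict.mk [])
  (results.items.map (fun q => (q.1, q.2.1)),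
   results.items.map (fun q => (q.1, q.2.2.1)),
   results.items.map (fun q => (q.1, q.2.2.2)))

-- ===== PRECONDITION & SPEC =====
-- Pre_ excludes exactly the inputs where A raises KeyError: a filename in border_thresholds
-- that is missing from border_references.
def Pre_classify_detections (border_thresholds : List (String × List (Int × Int × Int × Int))) (border_references : List (String × List (Int × Int × Int × Int))) : Prop :=
  ∀ p ∈ border_thresholds, ∃ q ∈ border_references, q.1 = p.1
instance (border_thresholds : List (String × List (Int × Int × Int × Int))) (border_references : List (String × List (Int × Int × Int × Int))) : Decidable (Pre_classify_detections border_thresholds border_references) := by unfold Pre_classify_detections; infer_instance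

def pvWitness_classify_detections : (List (String × List (Int × Int × Int × Int))) × (List (String × List (Int × Int × Int × Int))) :=
  ([("a", [(0, 0, 1, 1)]), ("b", [(5, 5, 6, 6), (0, 0, 1, 1)])],
   [("a", [(0, 0, 2, 2)]), ("b", [(0, 0, 1, 1)])])

def Spec_classify_detections (border_thresholds : List (String × List (Int × Int × Int × Int))) (border_references : List (String × List (Int × Int × Int × Int))) (out : (List (String × List (Int × Int × Int × Int))) × (List (String × List (Int × Int × Int × Int))) × (List (String × List (Int × Int × Int × Int)))) : Prop := out = classify_detections_alt border_thresholds border_references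
instance (border_thresholds : List (String × List (Int × Int × Int × Int))) (border_references : List (String × List (Int × Int × Int × Int))) (out : (List (String × List (Int × Int × Int × Int))) × (List (String × List (Int × Int × Int × Int))) × (List (String × List (Int × Int × Int × Int)))) : Decidable (Spec_classify_detections border_thresholds border_references out) := by
  unfold Spec_classify_detections
  letI h : DecidableEq (List (String × List (Int × Int × Int × Int))) := @instDecidableEqList _ (by infer_instance)
  infer_instance

-- ===== CLAIM (what is proved, stated in full; the proofs are below) =====
def Claim_equal_classify_detections : Prop := ∀ (border_thresholds : List (String × List (Int × Int × Int × Int))) (border_references : List (String × List (Int × Int × Int × Int))), Dom_classify_detections border_thresholds border_references → Pre_classify_detections border_thresholds border_references → Spec_classify_detections border_thresholds border_references (classify_detections border_thresholds border_references)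

-- ===== LEMMAS AND PROOFS =====

lemma pvRemove_append {xs ys : List PvRect} {v : PvRect} (h : v ∉ xs) :
    pvRemove (xs ++ v :: ys) v = xs ++ ys := by
  have hv : v ∈ xs ++ v :: ys := by simp
  simp [pvRemove, PySem.List.remove?_eq_some_erase _ v hv, List.erase_append_right _ h,
    List.erase_cons_head]

lemma pvFindMatch_none {used : PySem.Set Int} {rect : PvRect} {l : List (Int × PvRect)}
    (h : pvFindMatch used rect l = none) :
    ∀ q ∈ l, PySem.Set.contains used q.1 = true ∨ pvIntersects q.2 rect = false := by
  induction l with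
  | nil => simp
  | cons q rest ih =>
    rw [pvFindMatch] at h
    split at h
    · simp at h
    · rename_i hc
      intro r hr
      rcases List.mem_cons.mp hr with hr | hr
      · subst hr
        by_cases h1 : PySem.Set.contains used r.1 = true
        · exact Or.inl h1
        · right
          simp at hc
          exact hc (by simpa [PySem.Set.contains] using h1)
      · exact ih h r hr

lemma pvFindMatch_some {used : PySem.Set Int} {rect : PvRect} {l : List (Int × PvRect)}
    {q : Int × PvRect} (h : pvFindMatch used rect l = some q) :
    ∃ l1 l2, l = l1 ++ q :: l2 ∧
      (∀ r ∈ l1, PySem.Set.contains used r.1 = true ∨ pvIntersects r.2 rect = false) ∧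
      PySem.Set.contains used q.1 = false ∧ pvIntersects q.2 rect = true := by
  induction l with
  | nil => simp [pvFindMatch] at h
  | cons p rest ih =>
    rw [pvFindMatch] at h
    split at h
    · rename_i hc
      cases h
      refine ⟨[], rest, by simp, by simp, ?_, ?_⟩
      · rcases Bool.and_eq_true_iff.mp hc with ⟨h1, _⟩
        simpa using h1
      · exact (Bool.and_eq_true_iff.mp hc).2
    · rename_i hc
      obtain ⟨l1, l2, he, hall, hq⟩ := ih h
      refine ⟨p :: l1, l2, by simp [he], ?_, hq⟩
      intro r hr
      rcases List.mem_cons.mp hr with hr | hr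
      · subst hr
        by_cases h1 : PySem.Set.contains used r.1 = true
        · exact Or.inl h1
        · right; simp at hc; exact hc (by simpa [PySem.Set.contains] using h1)
      · exact hall r hr

lemma pvInter_eq : pvIntersects = is_intersection := rfl

lemma pvInnerA_eq (br : List PvRect) (rect : PvRect) (idx : List Nat)
    (tp fp fn : List PvRect) (used : List Bool) (usedB : PySem.Set Int)
    (hR : ∀ j : Nat, ((j : Int) ∈ usedB) ↔ used.getD j false = true) :
    pvInnerA br rect idx (tp, fp, fn, used) =
      match pvFindMatch usedB rect (idx.map (fun (i : Nat) => ((i : Int), br.getD i (0, 0, 0, 0)))) with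
      | none => (tp, fp, fn, used)
      | some q => (tp ++ [q.2], pvRemove fp rect, pvRemove fn q.2, used.set q.1.toNat true) := by
  induction idx with
  | nil => simp [pvInnerA, pvFindMatch]
  | cons i rest ih =>
    have hcont : PySem.Set.contains usedB ((i : Nat) : Int) = used.getD i false := by
      by_cases hm : used.getD i false = true
      · rw [hm]
        simp only [PySem.Set.contains, List.contains_iff_mem]
        simpa using (hR i).mpr hm
      · simp only [Bool.not_eq_true] at hm
        rw [hm]
        simp only [PySem.Set.contains]
        simp only [Bool.eq_false_iff, Ne]
        intro hmem
        have := (hR i).mp (by simpa using hmem)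
        rw [this] at hm
        exact absurd hm (by simp)
    rw [List.map_cons, pvFindMatch, pvInnerA]
    cases hu : used.getD i false with
    | true =>
      simp only [hu] at hcont
      rw [if_pos (by simp), if_neg (by rw [hcont]; simp)]
      exact ih
    | false =>
      simp only [hu] at hcont
      rw [if_neg (by simp)]
      cases hi : is_intersection (br.getD i (0, 0, 0, 0)) rect with
      | true =>
        have hnm : ((i : Nat) : Int) ∉ usedB := by
          intro hmem
          have := (hR i).mp hmem
          rw [this] at hu
          exact absurd hu (by simp)
        have hi' : is_intersection (br[i]?.getD (0, 0, 0, 0)) rect = true := by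
          simpa [List.getD] using hi
        simp [hi', pvInter_eq, hnm, Int.toNat_natCast]
      | false =>
        have h2 : pvIntersects (br[i]?.getD (0, 0, 0, 0)) rect = false := by
          simpa [pvInter_eq, List.getD] using hi
        rw [if_neg (by simp [pvInter_eq ▸ h2]), if_neg (by simp [h2])]
        exact ih

lemma pv_enumerate_eq_map_range (xs : List PvRect) :
    PySem.List.enumerate xs =
      (List.range xs.length).map (fun (i : Nat) => ((i : Int), xs.getD i (0, 0, 0, 0))) := by
  apply List.ext_getElem?
  intro k
  simp [PySem.List.getElem?_enumerate, List.getElem?_map]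
  by_cases h : k < xs.length
  · simp [h]
  · simp [List.getElem?_eq_none (by omega : xs.length ≤ k)]
    omega

lemma pv_mem_enum {br : List PvRect} {j : Nat} (hj : j < br.length) :
    ((j : Int), br.getD j (0, 0, 0, 0)) ∈ PySem.List.enumerate br := by
  rw [pv_enumerate_eq_map_range]
  exact List.mem_map.mpr ⟨j, List.mem_range.mpr hj, rfl⟩

lemma pv_add_eq_append {s : PySem.Set Int} {x : Int} (h : x ∉ s) :
    PySem.Set.add s x = s ++ [x] := by
  simp [PySem.Set.add, PySem.Set.contains]
  intro hc
  exact absurd (by simpa using hc) h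

lemma pv_main (br : List PvRect) :
    ∀ (rest done : List (Int × PvRect)) (tp fp fn : List PvRect) (used : List Bool)
      (usedB mt : PySem.Set Int),
    used.length = br.length →
    (∀ j : Nat, ((j : Int) ∈ usedB) ↔ used.getD j false = true) →
    (((done ++ rest).map (·.1)).Nodup) →
    (∀ x ∈ mt, x ∈ done.map (·.1)) →
    fp = (done.filter (fun p => !(PySem.Set.contains mt p.1))).map (·.2) ++ rest.map (·.2) →
    fn = ((PySem.List.enumerate br).filter (fun q => !(PySem.Set.contains usedB q.1))).map (·.2) →
    (∀ p ∈ done, ((p : Int × PvRect).1 ∉ mt) → ∀ j : Nat, j < br.length →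
        used.getD j false = false → is_intersection (br.getD j (0, 0, 0, 0)) p.2 = false) →
    (let fA := (rest.map (·.2)).foldl
        (fun st rect => pvInnerA br rect (List.range br.length) st) (tp, fp, fn, used)
     let fB := rest.foldl
        (fun (st : List PvRect × PySem.Set Int × PySem.Set Int) p =>
          match pvFindMatch st.2.1 p.2 (PySem.List.enumerate br) with
          | some q => (st.1 ++ [q.2], PySem.Set.add st.2.1 q.1, PySem.Set.add st.2.2 p.1)
          | none => st) (tp, usedB, mt)
     fA.1 = fB.1 ∧
     fA.2.1 = ((done ++ rest).filter (fun p => !(PySem.Set.contains fB.2.2 p.1))).map (·.2) ∧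
     fA.2.2.1 = ((PySem.List.enumerate br).filter (fun q => !(PySem.Set.contains fB.2.1 q.1))).map (·.2)) := by
  intro rest
  induction rest with
  | nil =>
    intro done tp fp fn used usedB mt hlen hR hnd hmt hfp hfn hP
    refine ⟨rfl, ?_, hfn⟩
    simpa using hfp
  | cons p rest' ih =>
    intro done tp fp fn used usedB mt hlen hR hnd hmt hfp hfn hP
    have hpm : p.1 ∉ done.map (·.1) := by
      intro hx
      have hd := List.disjoint_of_nodup_append (by simpa [List.map_append] using hnd)
      exact hd hx (by simp)
    have hpmt : p.1 ∉ mt := fun hx => hpm (hmt _ hx)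
    have hstep := pvInnerA_eq br p.2 (List.range br.length) tp fp fn used usedB hR
    rw [← pv_enumerate_eq_map_range br] at hstep
    simp only [List.map_cons, List.foldl_cons]
    rw [hstep]
    cases hfm : pvFindMatch usedB p.2 (PySem.List.enumerate br) with
    | none =>
      have hres := ih (done ++ [p]) tp fp fn used usedB mt hlen hR
        (by rwa [← List.append_cons])
        (fun x hx => by simp [List.map_append]; exact Or.inl (by simpa using hmt x hx))
        (by
          rw [hfp]
          have : (done ++ [p]).filter (fun r => !(PySem.Set.contains mt r.1)) =
              done.filter (fun r => !(PySem.Set.contains mt r.1)) ++ [p] := by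
            rw [List.filter_append]
            congr 1
            simp [PySem.Set.contains]
            intro hc
            exact absurd (by simpa using hc) hpmt
          rw [this]
          simp)
        hfn
        (by
          intro r hr hrmt j hj hjus
          rcases List.mem_append.mp hr with hr | hr
          · exact hP r hr hrmt j hj hjus
          · have : r = p := by simpa using hr
            subst this
            have := pvFindMatch_none hfm ((j : Int), br.getD j (0, 0, 0, 0)) (pv_mem_enum hj)
            rcases this with hc | hc
            · have := (hR j).mp (by simpa [PySem.Set.contains] using hc)
              rw [this] at hjus
              exact absurd hjus (by simp)
            · simpa [pvInter_eq] using hc)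
      rw [List.append_cons]
      exact hres
    | some q =>
      obtain ⟨l1, l2, hsplit, hl1, hqc, hqi⟩ := pvFindMatch_some hfm
      -- q comes from enumerate br: q = (k, br[k]) with k < br.length
      have hqmem : q ∈ PySem.List.enumerate br := by rw [hsplit]; simp
      obtain ⟨k, hkr, hkq⟩ := List.mem_map.mp ((pv_enumerate_eq_map_range br) ▸ hqmem)
      have hk : k < br.length := List.mem_range.mp hkr
      have hq1 : q.1 = (k : Int) := by rw [← hkq]
      have hq2 : q.2 = br.getD k (0, 0, 0, 0) := by rw [← hkq]
      have hkused : used.getD k false = false := by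
        by_cases h : used.getD k false = true
        · exact absurd ((hR k).mpr h) (by
            intro hmem
            have : PySem.Set.contains usedB q.1 = true := by
              rw [hq1]; simpa [PySem.Set.contains] using hmem
            rw [this] at hqc; exact absurd hqc (by simp))
        · simpa using h
      have hknotmem : ((k : Int)) ∉ usedB := by
        intro hmem
        have := (hR k).mp hmem
        rw [this] at hkused; exact absurd hkused (by simp)
      have hadd : PySem.Set.add usedB q.1 = usedB ++ [(k : Int)] := by
        rw [hq1]; exact pv_add_eq_append hknotmem
      have haddmt : PySem.Set.add mt p.1 = mt ++ [p.1] := pv_add_eq_append hpmt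
      -- new used-relation
      have hR' : ∀ j : Nat, ((j : Int) ∈ PySem.Set.add usedB q.1) ↔
          (used.set k true).getD j false = true := by
        intro j
        rw [hadd]
        by_cases hjk : j = k
        · subst hjk
          simp [List.getD, List.getElem?_set_self (by omega : j < used.length)]
        · simp [List.getD, List.getElem?_set_ne (fun h => hjk h.symm), hR j,
            (by exact_mod_cast hjk : ((j : Int)) ≠ (k : Int))]
      have hinter : is_intersection (br.getD k (0, 0, 0, 0)) p.2 = true := by
        rw [← hq2]
        simpa [pvInter_eq] using hqi
      -- the removed false positive is exactly the head of the unprocessed suffix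
      have hfpstep : pvRemove fp p.2 =
          ((done ++ [p]).filter
            (fun r => !(PySem.Set.contains (PySem.Set.add mt p.1) r.1))).map (·.2)
            ++ rest'.map (·.2) := by
        have hnotin : p.2 ∉ (done.filter (fun r => !(PySem.Set.contains mt r.1))).map (·.2) := by
          intro hx
          obtain ⟨r, hrf, hr2⟩ := List.mem_map.mp hx
          obtain ⟨hrd, hrc⟩ := List.mem_filter.mp hrf
          have hrmt : r.1 ∉ mt := by
            intro hxx
            simp [PySem.Set.contains] at hrc
            exact absurd hxx hrc
          have hfalse := hP r hrd hrmt k hk hkused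
          rw [hr2] at hfalse
          rw [hfalse] at hinter
          exact absurd hinter (by simp)
        rw [List.map_cons] at hfp
        rw [hfp, pvRemove_append hnotin]
        congr 1
        rw [List.filter_append]
        have h1 : [p].filter (fun r => !(PySem.Set.contains (PySem.Set.add mt p.1) r.1)) = [] := by
          simp [haddmt, PySem.Set.contains]
        have h2 : done.filter (fun r => !(PySem.Set.contains (PySem.Set.add mt p.1) r.1)) =
            done.filter (fun r => !(PySem.Set.contains mt r.1)) := by
          apply List.filter_congr
          intro r hr
          have hrp : r.1 ≠ p.1 := by
            intro he
            exact hpm (he ▸ List.mem_map_of_mem hr)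
          simp [haddmt, PySem.Set.contains, hrp]
        rw [h1, h2]
        simp
      -- the removed false negative is exactly the reference picked by the greedy scan
      have hfnstep : pvRemove fn q.2 =
          ((PySem.List.enumerate br).filter
            (fun r => !(PySem.Set.contains (PySem.Set.add usedB q.1) r.1))).map (·.2) := by
        have hpw := PySem.List.pairwise_lt_enumerate br 0
        rw [hsplit] at hpw
        rcases List.pairwise_append.mp hpw with ⟨hpw1, hpw2, hcross⟩
        have hql2 : ∀ b ∈ l2, q.1 < b.1 := (List.pairwise_cons.mp hpw2).1
        have hl1q : ∀ a ∈ l1, a.1 < q.1 := fun a ha => hcross a ha q (by simp)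
        have hfq : (!(PySem.Set.contains usedB q.1)) = true := by rw [hqc]; rfl
        have hnotin : q.2 ∉ (l1.filter (fun r => !(PySem.Set.contains usedB r.1))).map (·.2) := by
          intro hx
          obtain ⟨r, hrf, hr2⟩ := List.mem_map.mp hx
          obtain ⟨hrd, hrc⟩ := List.mem_filter.mp hrf
          rcases hl1 r hrd with hc | hc
          · rw [hc] at hrc; exact absurd hrc (by simp)
          · rw [hr2] at hc
            rw [hc] at hqi
            exact absurd hqi (by simp)
        rw [hfn, hsplit, List.filter_append, List.filter_cons]
        simp only [hfq, if_true]
        rw [List.map_append, List.map_cons, pvRemove_append hnotin]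
        rw [List.filter_append, List.filter_cons]
        have hfq' : (!(PySem.Set.contains (PySem.Set.add usedB q.1) q.1)) = false := by
          simp [PySem.Set.contains, hq1]
        simp only [hfq']
        have hcg : ∀ l : List (Int × PvRect), (∀ r ∈ l, r.1 ≠ q.1) →
            l.filter (fun r => !(PySem.Set.contains (PySem.Set.add usedB q.1) r.1)) =
            l.filter (fun r => !(PySem.Set.contains usedB r.1)) := by
          intro l hl
          apply List.filter_congr
          intro r hr
          have : r.1 ≠ (k : Int) := by rw [← hq1]; exact hl r hr
          simp [hadd, PySem.Set.contains, this]
        rw [hcg l1 (fun r hr => ne_of_lt (hl1q r hr)), hcg l2 (fun r hr => ne_of_gt (hql2 r hr))]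
        simp
      -- invariant P is preserved
      have hP' : ∀ r ∈ done ++ [p], ((r : Int × PvRect).1 ∉ PySem.Set.add mt p.1) → ∀ j : Nat,
          j < br.length → (used.set k true).getD j false = false →
          is_intersection (br.getD j (0, 0, 0, 0)) r.2 = false := by
        intro r hr hrmt j hj hjus
        rcases List.mem_append.mp hr with hr | hr
        · have hjk : j ≠ k := by
            intro he
            subst he
            rw [List.getD, List.getElem?_set_self (by omega : j < used.length)] at hjus
            simp at hjus
          have : used.getD j false = false := by
            rwa [List.getD, List.getElem?_set_ne (fun h => hjk h.symm)] at hjus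
          exact hP r hr (fun hx => hrmt ((PySem.Set.mem_add mt p.1 r.1).mpr (Or.inl hx))) j hj this
        · have : r = p := by simpa using hr
          subst this
          exact absurd ((PySem.Set.mem_add mt r.1 r.1).mpr (Or.inr rfl)) hrmt
      have hres := ih (done ++ [p]) (tp ++ [q.2]) (pvRemove fp p.2) (pvRemove fn q.2)
        (used.set k true) (PySem.Set.add usedB q.1) (PySem.Set.add mt p.1)
        (by simpa using hlen) hR'
        (by rwa [← List.append_cons])
        (by
          intro x hx
          rcases (PySem.Set.mem_add mt p.1 x).mp hx with hx | hx
          · simp [List.map_append]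
            exact Or.inl (by simpa using hmt x hx)
          · subst hx
            simp [List.map_append])
        hfpstep hfnstep hP'
      rw [List.append_cons]
      have hkt : q.1.toNat = k := by rw [hq1]; simp
      rw [← hkt] at hres
      exact hres

lemma classify_detection_eq (bt br : List PvRect) :
    classify_detection bt br = classify_detection_alt bt br := by
  have h := pv_main br (PySem.List.enumerate bt) [] [] bt br
    (List.replicate br.length false) PySem.Set.empty PySem.Set.empty
    (by simp)
    (by
      intro j
      simp [PySem.Set.empty])
    (by
      simp only [List.nil_append]
      exact List.pairwise_map.mpr ((PySem.List.pairwise_lt_enumerate bt 0).imp fun h => ne_of_lt h))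
    (by simp [PySem.Set.empty])
    (by simp [PySem.List.map_snd_enumerate])
    (by simp [PySem.Set.contains, PySem.Set.empty, PySem.List.map_snd_enumerate])
    (by simp)
  rw [PySem.List.map_snd_enumerate] at h
  obtain ⟨h1, h2, h3⟩ := h
  simp only [List.nil_append] at h2
  unfold classify_detection classify_detection_alt
  simp only []
  exact Prod.ext h1 (Prod.ext h2 h3)

def pvMapVal {α β : Type} (d : PySem.Dict String α) (f : α → β) : PySem.Dict String β :=
  PySem.Dict.mk (d.items.map (fun p => (p.1, f p.2)))

lemma pvMapVal_contains {α β : Type} (d : PySem.Dict String α) (f : α → β) (k : String) :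
    (pvMapVal d f).contains k = d.contains k := by
  simp only [pvMapVal, PySem.Dict.contains, List.any_map]
  rfl

lemma pvMapVal_insert {α β : Type} (d : PySem.Dict String α) (f : α → β) (k : String) (v : α) :
    pvMapVal (d.insert k v) f = (pvMapVal d f).insert k (f v) := by
  unfold PySem.Dict.insert
  rw [pvMapVal_contains]
  by_cases hc : d.contains k = true
  · simp only [hc, if_true, pvMapVal]
    congr 1
    rw [List.map_map, List.map_map]
    apply List.map_congr_left
    intro p _
    by_cases hp : p.1 = k
    · simp [hp]
    · simp [Function.comp, hp]
  · simp only [Bool.not_eq_true] at hc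
    simp [hc, pvMapVal]

lemma pv_outer (brs : List (String × List PvRect)) (bts : List (String × List PvRect))
    (d : PySem.Dict String (List PvRect × List PvRect × List PvRect)) :
    bts.foldl
      (fun (acc : PySem.Dict String (List PvRect) × PySem.Dict String (List PvRect) × PySem.Dict String (List PvRect)) p =>
        match (PySem.Dict.mk brs).get? p.1 with
        | some border_reference =>
          let c := classify_detection p.2 border_reference
          (acc.1.insert p.1 c.1, acc.2.1.insert p.1 c.2.1, acc.2.2.insert p.1 c.2.2)
        | none => acc)
      (pvMapVal d (·.1), pvMapVal d (·.2.1), pvMapVal d (·.2.2)) =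
    (let r := bts.foldl
        (fun (d : PySem.Dict String (List PvRect × List PvRect × List PvRect)) p =>
          match (PySem.Dict.mk brs).get? p.1 with
          | some border_reference => d.insert p.1 (classify_detection_alt p.2 border_reference)
          | none => d) d
     (pvMapVal r (·.1), pvMapVal r (·.2.1), pvMapVal r (·.2.2))) := by
  induction bts generalizing d with
  | nil => simp
  | cons p rest ih =>
    simp only [List.foldl_cons]
    cases hg : (PySem.Dict.mk brs).get? p.1 with
    | none => exact ih d
    | some br =>
      dsimp only []
      rw [classify_detection_eq p.2 br]
      rw [← pvMapVal_insert d (·.1) p.1 (classify_detection_alt p.2 br),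
          ← pvMapVal_insert d (·.2.1) p.1 (classify_detection_alt p.2 br),
          ← pvMapVal_insert d (·.2.2) p.1 (classify_detection_alt p.2 br)]
      exact ih _

-- ===== VERDICT (by name: the statement is the Claim_ definition above) =====
theorem classify_detections_spec : Claim_equal_classify_detections := by
  intro border_thresholds border_references _ _
  unfold Spec_classify_detections
  exact congrArg (fun t => (t.1.items, t.2.1.items, t.2.2.items))
    (pv_outer border_references border_thresholds (PySem.Dict.mk []))
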